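-- pv_equiv track=rewrite | github.com/joker4002/Enhanced-Coding-Agent-via-Dynamic-Embedding-and-ANN-Search | eval_recall_nl_vs_code.py | pick_code_query
-- ===== SOURCE A (Python) =====
-- def pick_code_query(gold_terms):
--     for t in gold_terms:
--         if "." in t:
--             return t
--     for t in gold_terms:
--         if "_" in t:
--             return t
--     return gold_terms[0] if gold_terms else ""
-- ===== SOURCE B (Python) =====
-- def pick_code_query(gold_terms):
--     if not gold_terms:
--         return ""
--     def rank(t):
--         if "." in t:
--             return 0
--         if "_" in t:
--             return 1
--         return 2
--     return min(gold_terms, key=rank)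
-- ===== Notes on version B (the rewrite author's own statement) =====
-- stated objective: idiomatic
-- what changed: Replaces A's two sequential scans and tail fallback by assigning each term a priority rank (dot=0, underscore=1, other=2) and taking the stable minimum by that rank.
import Mathlib
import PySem

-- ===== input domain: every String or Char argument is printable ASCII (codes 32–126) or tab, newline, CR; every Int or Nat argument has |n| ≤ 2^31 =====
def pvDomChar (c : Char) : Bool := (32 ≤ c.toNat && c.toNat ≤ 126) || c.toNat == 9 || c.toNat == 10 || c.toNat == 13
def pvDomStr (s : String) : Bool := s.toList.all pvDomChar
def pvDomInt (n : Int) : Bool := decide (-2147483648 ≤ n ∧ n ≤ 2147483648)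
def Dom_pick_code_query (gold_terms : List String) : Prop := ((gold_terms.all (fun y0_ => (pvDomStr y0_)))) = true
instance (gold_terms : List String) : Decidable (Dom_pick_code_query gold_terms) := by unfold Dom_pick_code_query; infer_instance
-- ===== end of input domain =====

-- B replaces A's two sequential scans by ranking each term (dot=0, underscore=1, other=2) and taking the stable minimum by rank.

-- ===== PORT A =====
-- first loop of A: return the first term containing "."
def pcqDotLoop : List String → Option String
  | [] => none
  | t :: ts => if PySem.Str.isIn "." t then some t else pcqDotLoop ts

-- second loop of A: return the first term containing "_"
def pcqUnderLoop : List String → Option String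
  | [] => none
  | t :: ts => if PySem.Str.isIn "_" t then some t else pcqUnderLoop ts

def pick_code_query (gold_terms : List String) : String :=
  match pcqDotLoop gold_terms with
  | some t => t
  | none =>
    match pcqUnderLoop gold_terms with
    | some t => t
    | none => match gold_terms with
      | [] => ""
      | t :: _ => t

-- ===== PORT B =====
-- Source B's rank helper: priority of a term
def pcqRank (t : String) : Int :=
  if PySem.Str.isIn "." t then 0
  else if PySem.Str.isIn "_" t then 1
  else 2

def pick_code_query_alt (gold_terms : List String) : String :=
  match gold_terms with
  | [] => ""
  | _ =>
    match PySem.List.min? gold_terms pcqRank with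
    | some m => m
    | none => ""   -- unreachable: the list is nonempty

-- ===== PRECONDITION & SPEC =====
def Spec_pick_code_query (gold_terms : List String) (out : String) : Prop := out = pick_code_query_alt gold_terms
instance (gold_terms : List String) (out : String) : Decidable (Spec_pick_code_query gold_terms out) := by unfold Spec_pick_code_query; infer_instance

-- ===== CLAIM (what is proved, stated in full; the proofs are below) =====
def Claim_equal_pick_code_query : Prop := ∀ (gold_terms : List String), Dom_pick_code_query gold_terms → Spec_pick_code_query gold_terms (pick_code_query gold_terms)

-- ===== LEMMAS AND PROOFS =====
-- the fold step of PySem.List.min? for key pcqRank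
theorem pcq_min_go (l : List String) (m : String) :
    List.foldl
      (fun acc x =>
        match acc with
        | none => some x
        | some m => if pcqRank x < pcqRank m then some x else some m)
      (some m) l =
    some (if PySem.Str.isIn "." m then m
          else match pcqDotLoop l with
          | some t => t
          | none =>
            if PySem.Str.isIn "_" m then m
            else match pcqUnderLoop l with
            | some t => t
            | none => m) := by
  induction l generalizing m with
  | nil =>
    simp only [List.foldl_nil, pcqDotLoop, pcqUnderLoop]
    split
    · rfl
    · split <;> rfl
  | cons x xs ih =>
    have hstep : List.foldl
        (fun acc x =>
          match acc with
          | none => some x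
          | some m => if pcqRank x < pcqRank m then some x else some m)
        (some m) (x :: xs) =
      List.foldl
        (fun acc x =>
          match acc with
          | none => some x
          | some m => if pcqRank x < pcqRank m then some x else some m)
        (some (if pcqRank x < pcqRank m then x else m)) xs := by
      rw [List.foldl_cons]
      congr 1
      show (if pcqRank x < pcqRank m then some x else some m)
            = some (if pcqRank x < pcqRank m then x else m)
      split <;> rfl
    rw [hstep, ih]
    by_cases hdm : PySem.Chars.isIn ['.'] m.toList = true <;>
      by_cases hdx : PySem.Chars.isIn ['.'] x.toList = true <;>
      by_cases hum : PySem.Chars.isIn ['_'] m.toList = true <;>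
      by_cases hux : PySem.Chars.isIn ['_'] x.toList = true <;>
      simp [pcqRank, pcqDotLoop, pcqUnderLoop, hdm, hdx, hum, hux]

theorem pcq_min_eq (t : String) (ts : List String) :
    PySem.List.min? (t :: ts) pcqRank =
    some (if PySem.Str.isIn "." t then t
          else match pcqDotLoop ts with
          | some t => t
          | none =>
            if PySem.Str.isIn "_" t then t
            else match pcqUnderLoop ts with
            | some t => t
            | none => t) := by
  have h : PySem.List.min? (t :: ts) pcqRank =
      List.foldl
        (fun acc x =>
          match acc with
          | none => some x
          | some m => if pcqRank x < pcqRank m then some x else some m)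
        none (t :: ts) := by
    unfold PySem.List.min?
    congr 1
    funext acc x
    cases acc <;> rfl
  rw [h, List.foldl_cons]
  exact pcq_min_go ts t

-- ===== VERDICT (by name: the statement is the Claim_ definition above) =====
theorem pick_code_query_spec : Claim_equal_pick_code_query := by
  intro gold_terms _
  unfold Spec_pick_code_query
  cases gold_terms with
  | nil => rfl
  | cons t ts =>
    simp only [pick_code_query, pick_code_query_alt, pcq_min_eq, pcqDotLoop, pcqUnderLoop]
    by_cases hd : PySem.Chars.isIn ['.'] t.toList = true <;>
      by_cases hu : PySem.Chars.isIn ['_'] t.toList = true <;>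
      simp [hd, hu] <;>
      (try cases pcqDotLoop ts) <;> (try cases pcqUnderLoop ts) <;> (try simp)
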